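-- pv_equiv track=rewrite | github.com/JesusFernandez1/2DDAW | Python/zoom.py | zoom
-- ===== SOURCE A (Python) =====
-- def zoom (matriz):
--     dim = len(matriz)*2
--     zoom = [0] * dim
--
--     for i in range(dim):
--         zoom[i] = [0] * len(matriz[0])*2
--
--     for i in range(len(matriz)):
--         for j in range(len(matriz[i])):
--             for f in range(0,2):
--                 for c in range (0,2):
--                     zoom[i*2+f][j*2+c] = matriz[i][j]
--
--     return zoom
-- ===== SOURCE B (Python) =====
-- def zoom(matriz):
--     if not matriz:
--         return []
--     width = 2 * len(matriz[0])
--     res = []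
--     for fila in matriz:
--         nueva = [0] * width
--         for j in range(len(fila)):
--             nueva[2 * j] = fila[j]
--             nueva[2 * j + 1] = fila[j]
--         res.append(nueva)
--         res.append(list(nueva))
--     return res
-- ===== Notes on version B (the rewrite author's own statement) =====
-- stated objective: faster
-- what changed: A preallocates a 2n x 2m zero matrix and scatters every element into it with four nested index loops; B builds each zoomed row once (writing each element into positions 2j and 2j+1 of a fresh zero row) and appends two copies of it, so vertical duplication comes from row emission instead of an index loop; Pre_ excludes matrices with a row longer than the first row, where both programs raise IndexError.
import Mathlib
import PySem

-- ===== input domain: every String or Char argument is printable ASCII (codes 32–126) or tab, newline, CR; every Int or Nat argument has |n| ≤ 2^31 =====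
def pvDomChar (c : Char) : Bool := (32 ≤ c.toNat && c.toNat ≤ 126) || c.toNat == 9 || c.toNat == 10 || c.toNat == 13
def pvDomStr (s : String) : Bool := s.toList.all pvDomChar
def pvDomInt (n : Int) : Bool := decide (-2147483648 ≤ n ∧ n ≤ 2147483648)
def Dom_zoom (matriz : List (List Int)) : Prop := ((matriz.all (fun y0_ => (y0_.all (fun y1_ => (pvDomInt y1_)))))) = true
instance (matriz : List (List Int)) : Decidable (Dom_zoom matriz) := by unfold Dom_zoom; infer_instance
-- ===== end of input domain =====

-- B replaces A's preallocate-and-scatter (four nested index loops into a 2n×2m zero matrix) by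
-- building each zoomed row once and appending two copies; return values agree on Pre_zoom.

-- ===== PORT A =====
-- Python's initial `[0]*dim` holds int placeholders that the first loop fully overwrites with
-- list rows; the typed port starts from `[]` placeholders, which is exact for the return value.
def zoom (matriz : List (List Int)) : List (List Int) :=
  let dim := matriz.length * 2
  let z0 : List (List Int) :=
    (List.range dim).foldl
      (fun z i => z.set i (List.replicate ((matriz.headD []).length * 2) (0 : Int)))
      (List.replicate dim ([] : List Int))
  (List.range matriz.length).foldl
    (fun z i =>
      (List.range (matriz.getD i []).length).foldl
        (fun z j =>
          (List.range 2).foldl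
            (fun z f =>
              (List.range 2).foldl
                (fun z c =>
                  z.modify (i*2+f) (fun r => r.set (j*2+c) ((matriz.getD i []).getD j 0)))
                z)
            z)
        z)
    z0

-- ===== PORT B =====
def zoom_alt (matriz : List (List Int)) : List (List Int) :=
  match matriz with
  | [] => []
  | fila0 :: _ =>
    let width := 2 * fila0.length
    matriz.foldl
      (fun res fila =>
        let nueva :=
          (List.range fila.length).foldl
            (fun r j => (r.set (2*j) (fila.getD j 0)).set (2*j+1) (fila.getD j 0))
            (List.replicate width (0 : Int))
        res ++ [nueva, nueva])
      []

-- ===== PRECONDITION & SPEC =====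
-- Pre_ excludes matrices containing a row longer than the first row: there Python A raises
-- IndexError (it writes past the preallocated row width), and so does B.
def Pre_zoom (matriz : List (List Int)) : Prop :=
  ∀ fila ∈ matriz, fila.length ≤ (matriz.headD []).length
instance (matriz : List (List Int)) : Decidable (Pre_zoom matriz) := by
  unfold Pre_zoom; infer_instance
def pvWitness_zoom : List (List Int) := [[1, 2], [3, 4]]

def Spec_zoom (matriz : List (List Int)) (out : List (List Int)) : Prop := out = zoom_alt matriz
instance (matriz : List (List Int)) (out : List (List Int)) : Decidable (Spec_zoom matriz out) := by unfold Spec_zoom; infer_instance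

-- ===== CLAIM (what is proved, stated in full; the proofs are below) =====
def Claim_equal_zoom : Prop := ∀ (matriz : List (List Int)), Dom_zoom matriz → Pre_zoom matriz → Spec_zoom matriz (zoom matriz)

-- ===== LEMMAS AND PROOFS =====

-- the zoomed row of width 2*m built from fila (for fila.length ≤ m)
def pvRow (m : Nat) (fila : List Int) : List Int :=
  fila.flatMap (fun v => [v, v]) ++ List.replicate (2 * m - 2 * fila.length) (0 : Int)

lemma pv_set_append_add {α : Type} (l1 l2 : List α) (k : Nat) (v : α) :
    (l1 ++ l2).set (l1.length + k) v = l1 ++ l2.set k v := by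
  induction l1 with
  | nil => simp
  | cons a t ih => simp [Nat.succ_add, ih]

lemma pv_set2_append {α : Type} (l1 : List α) (x y v : α) (l2 : List α) :
    ((l1 ++ x :: y :: l2).set l1.length v).set (l1.length + 1) v = l1 ++ v :: v :: l2 := by
  induction l1 with
  | nil => simp [List.set]
  | cons a t ih => simp [ih]

lemma pv_modify2_append {α : Type} (l1 : List α) (x y : α) (l2 : List α) (f : α → α) :
    ((l1 ++ x :: y :: l2).modify l1.length f).modify (l1.length + 1) f
      = l1 ++ f x :: f y :: l2 := by
  induction l1 with
  | nil => simp [List.modify_cons]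
  | cons a t ih => simpa [List.modify_cons] using ih

lemma pv_modify_modify_same {α : Type} (l : List α) (i : Nat) (f g : α → α) :
    (l.modify i f).modify i g = l.modify i (fun x => g (f x)) := by
  induction l generalizing i with
  | nil => simp
  | cons a t ih =>
    cases i with
    | zero => simp [List.modify_cons]
    | succ i => simpa [List.modify_cons] using ih i

lemma pv_modify_modify_comm {α : Type} (l : List α) (i j : Nat) (f g : α → α)
    (h : i ≠ j) : (l.modify i f).modify j g = (l.modify j g).modify i f := by
  induction l generalizing i j with
  | nil => simp
  | cons a t ih =>
    cases i with
    | zero => cases j with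
      | zero => exact absurd rfl h
      | succ j => simp [List.modify_cons]
    | succ i => cases j with
      | zero => simp [List.modify_cons]
      | succ j => simpa [List.modify_cons] using ih i j (by omega)

-- first loop: setting every index of a full-length list yields a replicate
lemma pv_init_loop {α : Type} (v : α) (k : Nat) (z : List α) (hk : k ≤ z.length) :
    (List.range k).foldl (fun z i => z.set i v) z
      = List.replicate k v ++ z.drop k := by
  induction k with
  | zero => simp
  | succ k ih =>
    rw [List.range_succ, List.foldl_append, ih (by omega)]
    have hd : z.drop k = z[k] :: z.drop (k+1) := List.drop_eq_getElem_cons (by omega)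
    have : (List.replicate k v ++ z.drop k).set ((List.replicate k v).length + 0) v
        = List.replicate k v ++ (z.drop k).set 0 v := pv_set_append_add ..
    simp only [List.length_replicate, Nat.add_zero] at this
    rw [List.foldl_cons, List.foldl_nil, this, hd, List.set_cons_zero]
    simp [List.replicate_succ' (n := k)]

-- inner f/c loops for fixed i, j: rows 2i and 2i+1 each get positions 2j, 2j+1 set to v
lemma pv_fc_loops (z : List (List Int)) (i j : Nat) (v : Int) :
    (List.range 2).foldl
      (fun z f => (List.range 2).foldl
        (fun z c => z.modify (i*2+f) (fun r => r.set (j*2+c) v)) z) z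
    = (z.modify (i*2) (fun r => (r.set (j*2) v).set (j*2+1) v)).modify (i*2+1)
        (fun r => (r.set (j*2) v).set (j*2+1) v) := by
  have h2 : List.range 2 = [0, 1] := rfl
  simp [h2, pv_modify_modify_same]

-- j-loop: both rows evolve in lockstep, so it factors into one modify per row
lemma pv_two_row_fold (k a b : Nat) (hab : a ≠ b) (u : Nat → List Int → List Int)
    (z : List (List Int)) :
    (List.range k).foldl (fun z j => (z.modify a (u j)).modify b (u j)) z
      = (z.modify a (fun r => (List.range k).foldl (fun r j => u j r) r)).modify b
          (fun r => (List.range k).foldl (fun r j => u j r) r) := by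
  induction k with
  | zero =>
    simp only [List.range_zero, List.foldl_nil]
    rw [show (fun r : List Int => r) = id from rfl, List.modify_id, List.modify_id]
  | succ k ih =>
    rw [show List.range (k+1) = List.range k ++ [k] from List.range_succ,
        List.foldl_append, ih]
    simp only [List.foldl_cons, List.foldl_nil]
    have hF : (fun r => (List.range k ++ [k]).foldl (fun r j => u j r) r)
        = (fun r => u k ((List.range k).foldl (fun r j => u j r) r)) := by
      funext r; rw [List.foldl_append]; simp
    rw [hF, pv_modify_modify_comm _ b a _ _ (Ne.symm hab),
        pv_modify_modify_same, pv_modify_modify_same]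

-- the per-row update fold on a fresh zero row builds the zoomed row prefixwise
lemma pv_row_fold (fila : List Int) (m k : Nat) (hk : k ≤ fila.length)
    (hm : fila.length ≤ m) :
    (List.range k).foldl
      (fun r j => (r.set (j*2) (fila.getD j 0)).set (j*2+1) (fila.getD j 0))
      (List.replicate (2*m) (0 : Int))
    = (fila.take k).flatMap (fun v => [v, v]) ++ List.replicate (2*m - 2*k) (0 : Int) := by
  induction k with
  | zero => simp
  | succ k ih =>
    rw [show List.range (k+1) = List.range k ++ [k] from List.range_succ,
        List.foldl_append, ih (by omega)]
    simp only [List.foldl_cons, List.foldl_nil]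
    have hkl : k < fila.length := by omega
    have hv : fila.getD k 0 = fila[k] := by
      simp [List.getD_eq_getElem?_getD, List.getElem?_eq_getElem hkl]
    have hdup : ∀ (l : List Int), (l.flatMap (fun v => [v, v])).length = l.length * 2 := by
      intro l; induction l with
      | nil => rfl
      | cons a t iht => simp only [List.flatMap_cons, List.length_append, iht]; simp; omega
    have hlen : ((fila.take k).flatMap (fun v => [v, v])).length = k * 2 := by
      rw [hdup, List.length_take, Nat.min_eq_left (by omega)]
    have hrep : List.replicate (2*m - 2*k) (0 : Int)
        = 0 :: 0 :: List.replicate (2*m - 2*(k+1)) (0 : Int) := by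
      have h : 2*m - 2*k = (2*m - 2*(k+1)) + 1 + 1 := by omega
      rw [h]; rfl
    have ht : List.take (k+1) fila = List.take k fila ++ [fila[k]] := by
      rw [List.take_add_one, List.getElem?_eq_getElem hkl]; rfl
    rw [hrep, show k*2 = ((fila.take k).flatMap (fun v => [v, v])).length from hlen.symm]
    rw [pv_set2_append, hv, ht, List.flatMap_append]
    simp

-- B's inner fold (indices 2*j, 2*j+1) builds pvRow
lemma pv_b_row (fila : List Int) (m : Nat) (hm : fila.length ≤ m) :
    (List.range fila.length).foldl
      (fun r j => (r.set (2*j) (fila.getD j 0)).set (2*j+1) (fila.getD j 0))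
      (List.replicate (2*m) (0 : Int))
    = pvRow m fila := by
  have hfun : (fun (r : List Int) j => (r.set (2*j) (fila.getD j 0)).set (2*j+1) (fila.getD j 0))
      = (fun (r : List Int) j => (r.set (j*2) (fila.getD j 0)).set (j*2+1) (fila.getD j 0)) := by
    funext r j; rw [Nat.mul_comm 2 j]
  rw [hfun, pv_row_fold fila m fila.length (le_refl _) hm, List.take_length]; rfl

-- B's foldl-append is a flatMap
lemma pv_b_flatMap (l : List (List Int)) (acc : List (List Int)) (f : List Int → List Int) :
    l.foldl (fun res fila => res ++ [f fila, f fila]) acc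
      = acc ++ l.flatMap (fun fila => [f fila, f fila]) := by
  induction l generalizing acc with
  | nil => simp
  | cons h t ih => simp [ih]

lemma pv_flatMap_congr (l : List (List Int)) (f g : List Int → List Int)
    (h : ∀ x ∈ l, f x = g x) :
    l.flatMap (fun fila => [f fila, f fila]) = l.flatMap (fun fila => [g fila, g fila]) := by
  induction l with
  | nil => rfl
  | cons a t ih =>
    simp only [List.flatMap_cons, h a (List.mem_cons_self),
      ih (fun x hx => h x (List.mem_cons_of_mem a hx))]

lemma pv_D_length (m : Nat) (l : List (List Int)) :
    (l.flatMap (fun fila => [pvRow m fila, pvRow m fila])).length = l.length * 2 := by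
  induction l with
  | nil => rfl
  | cons h t ih => simp only [List.flatMap_cons, List.length_append, ih]; simp; omega

-- outer loop invariant of A
lemma pv_outer (matriz : List (List Int)) (hpre : Pre_zoom matriz) (i : Nat)
    (hi : i ≤ matriz.length) :
    (List.range i).foldl
      (fun z i =>
        (List.range (matriz.getD i []).length).foldl
          (fun z j => (List.range 2).foldl
            (fun z f => (List.range 2).foldl
              (fun z c =>
                z.modify (i*2+f) (fun r => r.set (j*2+c) ((matriz.getD i []).getD j 0)))
              z) z) z)
      (List.replicate (matriz.length * 2) (List.replicate ((matriz.headD []).length * 2) (0:Int)))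
    = (matriz.take i).flatMap
        (fun fila => [pvRow (matriz.headD []).length fila, pvRow (matriz.headD []).length fila])
      ++ List.replicate (matriz.length * 2 - i * 2)
          (List.replicate ((matriz.headD []).length * 2) (0 : Int)) := by
  induction i with
  | zero => simp
  | succ i ih =>
    rw [show List.range (i+1) = List.range i ++ [i] from List.range_succ,
        List.foldl_append, ih (by omega)]
    simp only [List.foldl_cons, List.foldl_nil]
    have hil : i < matriz.length := by omega
    have hfila : matriz.getD i [] = matriz[i] := by
      simp [List.getD_eq_getElem?_getD, List.getElem?_eq_getElem hil]
    have hmem : matriz[i] ∈ matriz := List.getElem_mem hil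
    have hm : (matriz[i]).length ≤ (matriz.headD []).length := hpre _ hmem
    have hbody :
        (fun (z : List (List Int)) j => (List.range 2).foldl
            (fun z f => (List.range 2).foldl
              (fun z c =>
                z.modify (i*2+f) (fun r => r.set (j*2+c) ((matriz.getD i []).getD j 0)))
              z) z)
        = (fun (z : List (List Int)) j =>
            (z.modify (i*2) (fun r => (r.set (j*2) ((matriz.getD i []).getD j 0)).set (j*2+1)
                ((matriz.getD i []).getD j 0))).modify (i*2+1)
              (fun r => (r.set (j*2) ((matriz.getD i []).getD j 0)).set (j*2+1)
                ((matriz.getD i []).getD j 0))) := by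
      funext z j; exact pv_fc_loops z i j _
    rw [hbody, pv_two_row_fold _ _ _ (by omega)]
    have hrep : List.replicate (matriz.length * 2 - i * 2)
          (List.replicate ((matriz.headD []).length * 2) (0 : Int))
        = List.replicate ((matriz.headD []).length * 2) (0 : Int)
          :: List.replicate ((matriz.headD []).length * 2) (0 : Int)
          :: List.replicate (matriz.length * 2 - (i+1) * 2)
              (List.replicate ((matriz.headD []).length * 2) (0 : Int)) := by
      have h : matriz.length * 2 - i * 2 = (matriz.length * 2 - (i+1) * 2) + 1 + 1 := by omega
      rw [h]; rfl
    rw [hrep,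
      show i*2 = ((matriz.take i).flatMap
        (fun fila => [pvRow (matriz.headD []).length fila,
                      pvRow (matriz.headD []).length fila])).length from by
          rw [pv_D_length]; rw [List.length_take, Nat.min_eq_left (by omega)],
      pv_modify2_append]
    have hG : (List.range (matriz.getD i []).length).foldl
          (fun r j => (r.set (j*2) ((matriz.getD i []).getD j 0)).set (j*2+1)
            ((matriz.getD i []).getD j 0))
          (List.replicate ((matriz.headD []).length * 2) (0 : Int))
        = pvRow (matriz.headD []).length matriz[i] := by
      rw [show (matriz.headD []).length * 2 = 2 * (matriz.headD []).length from by omega]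
      rw [hfila, pv_row_fold matriz[i] _ _ (le_refl _) hm, List.take_length]
      rfl
    have ht : List.take (i+1) matriz = List.take i matriz ++ [matriz[i]] := by
      rw [List.take_add_one, List.getElem?_eq_getElem hil]; rfl
    rw [hG, ht, List.flatMap_append]
    simp

theorem zoom_eq (matriz : List (List Int)) (hpre : Pre_zoom matriz) :
    zoom matriz = zoom_alt matriz := by
  cases matriz with
  | nil => rfl
  | cons fila0 rest =>
    have hA : zoom (fila0 :: rest)
        = (List.range (fila0 :: rest).length).foldl
            (fun z i =>
              (List.range ((fila0 :: rest).getD i []).length).foldl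
                (fun z j => (List.range 2).foldl
                  (fun z f => (List.range 2).foldl
                    (fun z c =>
                      z.modify (i*2+f) (fun r => r.set (j*2+c) (((fila0 :: rest).getD i []).getD j 0)))
                    z) z) z)
            ((List.range ((fila0 :: rest).length * 2)).foldl
              (fun z i => z.set i (List.replicate (((fila0 :: rest).headD []).length * 2) (0 : Int)))
              (List.replicate ((fila0 :: rest).length * 2) ([] : List Int))) := rfl
    have hB : zoom_alt (fila0 :: rest)
        = (fila0 :: rest).foldl
            (fun res fila => res ++
              [(List.range fila.length).foldl
                 (fun r j => (r.set (2*j) (fila.getD j 0)).set (2*j+1) (fila.getD j 0))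
                 (List.replicate (2 * fila0.length) (0 : Int)),
               (List.range fila.length).foldl
                 (fun r j => (r.set (2*j) (fila.getD j 0)).set (2*j+1) (fila.getD j 0))
                 (List.replicate (2 * fila0.length) (0 : Int))]) [] := rfl
    rw [hA, hB, pv_init_loop _ _ _ (by simp)]
    rw [List.drop_replicate, Nat.sub_self, List.replicate_zero, List.append_nil]
    rw [pv_outer (fila0 :: rest) hpre (fila0 :: rest).length (le_refl _)]
    rw [Nat.sub_self, List.replicate_zero, List.append_nil, List.take_length]
    rw [pv_b_flatMap]
    rw [List.nil_append]
    exact pv_flatMap_congr _ _ _ (fun fila hf => by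
      have := hpre fila hf
      simp only [List.headD_cons] at this ⊢
      exact (pv_b_row fila fila0.length this).symm)

-- ===== VERDICT (by name: the statement is the Claim_ definition above) =====
theorem zoom_spec : Claim_equal_zoom := by
  intro matriz _ hpre
  exact zoom_eq matriz hpre
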